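-- pv_equiv track=rewrite | github.com/alaiakim/codetest | 연습.py | solution
-- ===== SOURCE A (Python) =====
-- def solution(board):
--     n = len(board)
--     answer = 0
--     for i in range(n):
--         for j in range(n):
--             f_r = -1
--             t_r = 1
--             f_c = -1
--             t_c = 1
--             if i == 0:
--                 f_r = 0
--                 t_r = 1
--             elif i == n-1:
--                 f_r = -1
--                 t_r = 0
--             if j == 0:
--                 f_c = 0
--                 t_c = 1
--             elif j == n-1:
--                 f_c = -1
--                 t_c = 0
--
--             isSafe = True
--             for r in range(i+f_r, i+t_r+1):
--                 if isSafe == False: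
--                     break
--                 for c in range(j+f_c, j+t_c+1):
--                     if board[r][c] == 1:
--                         isSafe = False
--                         break
--
--             if isSafe == True:
--                 answer += 1
--
--     return answer
-- ===== SOURCE B (Python) =====
-- def solution(board):
--     # Separable 3x3 dilation over the n x n grid: one pass precomputes, for every
--     # row, the horizontal 3-window ORs; then each cell checks only the 3
--     # precomputed row masks above/at/below it.
--     n = len(board)
--     row = [[any(board[i][c] == 1 for c in range(max(0, j - 1), min(n, j + 2)))
--             for j in range(n)] for i in range(n)]
--     return sum(1 for i in range(n) for j in range(n)
--                if not any(row[r][j] for r in range(max(0, i - 1), min(n, i + 2))))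
-- ===== Notes on version B (the rewrite author's own statement) =====
-- stated objective: alternative
-- what changed: B replaces A's per-cell 3x3 scan with branch-table clamping and manual break flags by a separable dilation: one pass precomputes, for every row, the horizontal 3-window ORs over the n x n grid, and then each cell consults only the 3 precomputed row masks above/at/below it, counting safe cells with a generator sum.
-- outside the precondition, e.g. on solution([[91, 1]]): A returns 0, B returns 1; on solution([[1, 2], [1]]): A returns 0, B returns 0; on solution([[0]]): A raises IndexError, B returns 1
import Mathlib
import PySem

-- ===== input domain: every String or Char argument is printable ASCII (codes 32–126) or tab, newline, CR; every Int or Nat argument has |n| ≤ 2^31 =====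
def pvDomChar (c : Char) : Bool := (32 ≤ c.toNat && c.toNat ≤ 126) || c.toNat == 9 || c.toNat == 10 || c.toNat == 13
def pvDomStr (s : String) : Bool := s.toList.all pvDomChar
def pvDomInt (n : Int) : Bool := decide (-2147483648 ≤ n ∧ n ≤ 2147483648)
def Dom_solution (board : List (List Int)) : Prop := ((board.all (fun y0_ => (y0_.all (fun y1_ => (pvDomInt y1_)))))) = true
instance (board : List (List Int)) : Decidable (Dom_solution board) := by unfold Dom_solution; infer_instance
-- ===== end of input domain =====

-- B replaces A's per-cell 3x3 scan (branch-table clamping + manual break flags) by a separable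
-- dilation: precompute horizontal 3-window ORs per row, then each cell checks 3 row masks.


-- ===== PORT A =====
def solution (board : List (List Int)) : Int :=
  let n : Int := board.length
  (PySem.List.pyRange 0 n).foldl (fun answer i =>
    (PySem.List.pyRange 0 n).foldl (fun answer j =>
      let f_r : Int := if i = 0 then 0 else -1
      let t_r : Int := if i = 0 then 1 else if i = n - 1 then 0 else 1
      let f_c : Int := if j = 0 then 0 else -1
      let t_c : Int := if j = 0 then 1 else if j = n - 1 then 0 else 1
      let isSafe : Bool :=
        (PySem.List.pyRange (i + f_r) (i + t_r + 1)).foldl (fun s r =>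
          if s = false then s
          else (PySem.List.pyRange (j + f_c) (j + t_c + 1)).foldl (fun s c =>
            if s = false then s
            else if PySem.List.pyGetD (PySem.List.pyGetD board r []) c 0 == 1 then false
            else s) s) true
      if isSafe = true then answer + 1 else answer) answer) 0

-- ===== PORT B =====
def solution_alt (board : List (List Int)) : Int :=
  let n : Int := board.length
  let row : List (List Bool) := (PySem.List.pyRange 0 n).map (fun i =>
    (PySem.List.pyRange 0 n).map (fun j =>
      (PySem.List.pyRange (max 0 (j - 1)) (min n (j + 2))).any (fun c =>
        PySem.List.pyGetD (PySem.List.pyGetD board i []) c 0 == 1)))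
  (PySem.List.pyRange 0 n).foldl (fun acc i =>
    (PySem.List.pyRange 0 n).foldl (fun acc j =>
      if !((PySem.List.pyRange (max 0 (i - 1)) (min n (i + 2))).any (fun r =>
            PySem.List.pyGetD (PySem.List.pyGetD row r []) j false))
      then acc + 1 else acc) acc) 0

-- ===== PRECONDITION & SPEC =====
-- Pre_ excludes boards with a row shorter than the declared n×n grid, on which both programs in
-- general raise IndexError (A returns only when an early break on a 1 shields every missing
-- cell, a data-dependent set with no closed form), and 1×1 boards other than [[1]], on which A
-- reads row index 1 and raises IndexError unless an early break on a leading 1 shields the read.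
def Pre_solution (board : List (List Int)) : Prop :=
  (∀ r ∈ board, board.length ≤ r.length) ∧
  (board.length = 1 → board = [[1]])
instance (board : List (List Int)) : Decidable (Pre_solution board) := by
  unfold Pre_solution; infer_instance
def pvWitness_solution : List (List Int) := [[0, 0], [1, 0]]
def Spec_solution (board : List (List Int)) (out : Int) : Prop := out = solution_alt board
instance (board : List (List Int)) (out : Int) : Decidable (Spec_solution board out) := by
  unfold Spec_solution; infer_instance

-- ===== CLAIM (what is proved, stated in full; the proofs are below) =====
def Claim_equal_solution : Prop := ∀ (board : List (List Int)), Dom_solution board → Pre_solution board → Spec_solution board (solution board)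

-- ===== LEMMAS AND PROOFS =====

-- A's inner column loop: a fold with a break flag computes `all`.
theorem breakFoldInner (l : List Int) (g : Int → Bool) (b : Bool) :
    l.foldl (fun s c => if s = false then s else if g c then false else s) b
      = (b && l.all (fun c => !g c)) := by
  induction l generalizing b with
  | nil => simp
  | cons x xs ih =>
    simp only [List.foldl_cons, List.all_cons]
    rw [ih]
    cases b
    · simp
    · cases g x <;> simp

-- A's outer row loop: a fold with a break flag over per-row `all`s computes the nested `all`.
theorem breakFoldOuter (l : List Int) (h : Int → Bool) (b : Bool) :
    l.foldl (fun s r => if s = false then s else (s && h r)) b = (b && l.all h) := by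
  induction l generalizing b with
  | nil => simp
  | cons x xs ih =>
    simp only [List.foldl_cons, List.all_cons]
    rw [ih]
    cases b <;> simp

-- B's precomputed row mask at (r, j) is the horizontal any over the clamped column range.
theorem cellB (board : List (List Int)) (n : Int)
    (r j : Int) (hr0 : 0 ≤ r) (hr1 : r < n) (hj0 : 0 ≤ j) (hj1 : j < n) :
    PySem.List.pyGetD
      (PySem.List.pyGetD
        ((PySem.List.pyRange 0 n).map (fun i =>
          (PySem.List.pyRange 0 n).map (fun j' =>
            (PySem.List.pyRange (max 0 (j' - 1)) (min n (j' + 2))).any (fun c =>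
              PySem.List.pyGetD (PySem.List.pyGetD board i []) c 0 == 1)))) r []) j false
      = (PySem.List.pyRange (max 0 (j - 1)) (min n (j + 2))).any
          (fun c => PySem.List.pyGetD (PySem.List.pyGetD board r []) c 0 == 1) := by
  rw [PySem.List.pyGetD_map_pyRange_of_nonneg _ _ r [] hr0 hr1]
  rw [PySem.List.pyGetD_map_pyRange_of_nonneg _ _ j false hj0 hj1]

-- A's branch table is exactly clamping, once 2 ≤ n.
theorem rangeEq (n x : Int) (hn : 2 ≤ n) (hx0 : 0 ≤ x) (hx1 : x < n) :
    PySem.List.pyRange (x + (if x = 0 then 0 else -1))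
        (x + (if x = 0 then 1 else if x = n - 1 then 0 else 1) + 1)
      = PySem.List.pyRange (max 0 (x - 1)) (min n (x + 2)) := by
  have h1 : x + (if x = 0 then 0 else -1) = max 0 (x - 1) := by split_ifs <;> omega
  have h2 : x + (if x = 0 then 1 else if x = n - 1 then 0 else 1) + 1 = min n (x + 2) := by
    split_ifs <;> omega
  rw [h1, h2]

-- Per-cell agreement for n ≥ 2 square boards.
theorem mainCell (board : List (List Int)) (n : Int) (hn2 : 2 ≤ n)
    (i j : Int) (hi0 : 0 ≤ i) (hi1 : i < n) (hj0 : 0 ≤ j) (hj1 : j < n) :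
    ((PySem.List.pyRange (i + (if i = 0 then 0 else -1))
        (i + (if i = 0 then 1 else if i = n - 1 then 0 else 1) + 1)).foldl (fun s r =>
          if s = false then s
          else (PySem.List.pyRange (j + (if j = 0 then 0 else -1))
              (j + (if j = 0 then 1 else if j = n - 1 then 0 else 1) + 1)).foldl (fun s c =>
            if s = false then s
            else if PySem.List.pyGetD (PySem.List.pyGetD board r []) c 0 == 1 then false
            else s) s) true)
      = !((PySem.List.pyRange (max 0 (i - 1)) (min n (i + 2))).any (fun r =>
            PySem.List.pyGetD
              (PySem.List.pyGetD
                ((PySem.List.pyRange 0 n).map (fun i' =>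
                  (PySem.List.pyRange 0 n).map (fun j' =>
                    (PySem.List.pyRange (max 0 (j' - 1)) (min n (j' + 2))).any (fun c =>
                      PySem.List.pyGetD (PySem.List.pyGetD board i' []) c 0 == 1)))) r [])
              j false)) := by
  simp only [breakFoldInner, breakFoldOuter, Bool.true_and]
  simp only [rangeEq n i hn2 hi0 hi1, rangeEq n j hn2 hj0 hj1]
  have hB : (PySem.List.pyRange (max 0 (i - 1)) (min n (i + 2))).any (fun r =>
        PySem.List.pyGetD
          (PySem.List.pyGetD
            ((PySem.List.pyRange 0 n).map (fun i' =>
              (PySem.List.pyRange 0 n).map (fun j' =>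
                (PySem.List.pyRange (max 0 (j' - 1)) (min n (j' + 2))).any (fun c =>
                  PySem.List.pyGetD (PySem.List.pyGetD board i' []) c 0 == 1)))) r []) j false)
      = (PySem.List.pyRange (max 0 (i - 1)) (min n (i + 2))).any (fun r =>
        (PySem.List.pyRange (max 0 (j - 1)) (min n (j + 2))).any
          (fun c => PySem.List.pyGetD (PySem.List.pyGetD board r []) c 0 == 1)) := by
    apply PySem.List.any_congr_mem
    intro r hr
    rw [PySem.List.mem_pyRange_one] at hr
    exact cellB board n r j (by omega) (by omega) hj0 hj1
  rw [hB]
  simp only [List.not_any_eq_all_not]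

-- ===== VERDICT (by name: the statement is the Claim_ definition above) =====
theorem solution_spec : Claim_equal_solution := by
  intro board _ hpre
  obtain ⟨-, hone⟩ := hpre
  unfold Spec_solution
  by_cases h0 : board.length = 0
  · have hb : board = [] := List.length_eq_zero_iff.mp h0
    subst hb; decide
  by_cases hl1 : board.length = 1
  · obtain ⟨r0, hb⟩ := List.length_eq_one_iff.mp hl1
    subst hb
    have hb : [r0] = [[1]] := hone (by simp)
    rw [hb]; decide
  · have hn2 : (2 : Int) ≤ (board.length : Int) := by
      have : 2 ≤ board.length := by omega
      exact_mod_cast this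
    show solution board = solution_alt board
    simp only [solution, solution_alt]
    apply PySem.List.foldl_congr_mem
    intro acc i hi
    apply PySem.List.foldl_congr_mem
    intro acc2 j hj
    rw [PySem.List.mem_pyRange_one] at hi hj
    rw [mainCell board (board.length : Int) hn2 i j hi.1 hi.2 hj.1 hj.2]
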